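-- pv_equiv track=rewrite | github.com/dylan-murray/sigil | sigil/validation.py | _find_disagreements
-- ===== SOURCE A (Python) =====
-- ReviewDecisions = dict[int, tuple[str, str | None, str]]
--
-- def _find_disagreements(
--     decisions_a: ReviewDecisions,
--     decisions_b: ReviewDecisions,
--     total: int,
-- ) -> tuple[ReviewDecisions, set[int]]:
--     agreed: ReviewDecisions = {}
--     disagreed_indices: set[int] = set()
--
--     for idx in range(total):
--         a = decisions_a.get(idx)
--         b = decisions_b.get(idx)
--
--         if a is None and b is None:
--             continue
--
--         if a is None or b is None:
--             agreed[idx] = a if a is not None else b  # type: ignore[assignment]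
--             continue
--
--         action_a, disp_a, _ = a
--         action_b, disp_b, _ = b
--
--         if action_a == action_b and (action_a != "adjust" or disp_a == disp_b):
--             agreed[idx] = a
--         else:
--             disagreed_indices.add(idx)
--
--     return agreed, disagreed_indices
-- ===== SOURCE B (Python) =====
-- def _find_disagreements(decisions_a, decisions_b, total):
--     def merge(idx):
--         a = decisions_a.get(idx)
--         if a is None:
--             return decisions_b.get(idx)
--         b = decisions_b.get(idx)
--         if b is None:
--             return a
--         if a[0] == b[0] and (a[0] != "adjust" or a[1] == b[1]):
--             return a
--         return None
--     keys = sorted(set(decisions_a) | set(decisions_b))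
--     relevant = [k for k in keys if 0 <= k < total]
--     pairs = [(k, merge(k)) for k in relevant]
--     agreed = {k: v for k, v in pairs if v is not None}
--     disagreed = {k for k, v in pairs if v is None}
--     return agreed, disagreed
-- ===== Notes on version B (the rewrite author's own statement) =====
-- stated objective: alternative
-- what changed: A single fold over range(total) probing both dicts is replaced by staged passes over the data itself: sort the union of the dicts' keys, keep those in [0,total), classify each key once with a merge function, then split the (key, merge) pairs into the agreed dict and the disagreed set by comprehensions; cost depends on the number of entries rather than on total.
import Mathlib
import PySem

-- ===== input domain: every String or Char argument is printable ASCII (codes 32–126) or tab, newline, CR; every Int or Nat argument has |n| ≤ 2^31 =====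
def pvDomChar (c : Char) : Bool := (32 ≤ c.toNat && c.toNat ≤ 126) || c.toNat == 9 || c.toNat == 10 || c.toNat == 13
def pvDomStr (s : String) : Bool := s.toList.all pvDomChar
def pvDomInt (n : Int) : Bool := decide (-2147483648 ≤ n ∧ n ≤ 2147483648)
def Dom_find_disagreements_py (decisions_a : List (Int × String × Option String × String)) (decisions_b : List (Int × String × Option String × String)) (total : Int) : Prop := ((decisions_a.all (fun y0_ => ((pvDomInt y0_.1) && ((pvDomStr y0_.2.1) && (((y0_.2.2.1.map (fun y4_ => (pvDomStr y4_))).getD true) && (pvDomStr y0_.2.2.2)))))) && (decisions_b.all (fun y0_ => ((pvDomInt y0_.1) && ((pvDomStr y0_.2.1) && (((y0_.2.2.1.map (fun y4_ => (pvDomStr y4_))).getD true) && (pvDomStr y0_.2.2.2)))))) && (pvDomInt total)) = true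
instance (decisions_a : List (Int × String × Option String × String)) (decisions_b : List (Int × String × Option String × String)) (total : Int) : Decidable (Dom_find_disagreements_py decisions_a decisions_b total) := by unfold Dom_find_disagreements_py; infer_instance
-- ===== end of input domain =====

-- B replaces A's single stateful loop over range(total) by staged passes over the data itself:
-- sorted union of the dicts' keys restricted to [0, total), one classifying merge function,
-- then comprehensions splitting the classified pairs into the agreed dict and the disagreed set.

-- ===== PORT A =====
-- loop body of A's 'for idx in range(total)' (branches in A's order)
def pvStepA (decisions_a decisions_b : List (Int × String × Option String × String))
    (st : PySem.Dict Int (String × Option String × String) × PySem.Set Int) (idx : Int) :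
    PySem.Dict Int (String × Option String × String) × PySem.Set Int :=
  let a := (PySem.Dict.mk decisions_a).get? idx
  let b := (PySem.Dict.mk decisions_b).get? idx
  match a, b with
  | none, none => st                                    -- if a is None and b is None: continue
  | some v, none => (st.1.insert idx v, st.2)           -- agreed[idx] = a
  | none, some v => (st.1.insert idx v, st.2)           -- agreed[idx] = b
  | some va, some vb =>
    if va.1 = vb.1 ∧ (va.1 ≠ "adjust" ∨ va.2.1 = vb.2.1) then
      (st.1.insert idx va, st.2)                        -- agreed[idx] = a
    else
      (st.1, PySem.Set.add st.2 idx)                    -- disagreed_indices.add(idx)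

def find_disagreements_py (decisions_a : List (Int × String × Option String × String)) (decisions_b : List (Int × String × Option String × String)) (total : Int) : (List (Int × String × Option String × String)) × List Int :=
  let st := (PySem.List.pyRange 0 total 1).foldl (pvStepA decisions_a decisions_b)
    (PySem.Dict.empty, PySem.Set.empty)
  (st.1.items, st.2)

-- ===== PORT B =====
-- B's 'merge(idx)': the agreed value at idx, or None for a genuine disagreement
def pvMerge (decisions_a decisions_b : List (Int × String × Option String × String))
    (idx : Int) : Option (String × Option String × String) :=
  match (PySem.Dict.mk decisions_a).get? idx with
  | none => (PySem.Dict.mk decisions_b).get? idx        -- a is None: return decisions_b.get(idx)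
  | some a =>
    match (PySem.Dict.mk decisions_b).get? idx with
    | none => some a                                    -- b is None: return a
    | some b =>
      if a.1 = b.1 ∧ (a.1 ≠ "adjust" ∨ a.2.1 = b.2.1) then some a else none

def find_disagreements_py_alt (decisions_a : List (Int × String × Option String × String)) (decisions_b : List (Int × String × Option String × String)) (total : Int) : (List (Int × String × Option String × String)) × List Int :=
  let keys := PySem.List.sorted
    (PySem.Set.union (PySem.Set.ofList (decisions_a.map (·.1)))
                     (PySem.Set.ofList (decisions_b.map (·.1)))) (fun x => x) false
  let relevant := keys.filter (fun k => decide (0 ≤ k ∧ k < total))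
  let pairs := relevant.map (fun k => (k, pvMerge decisions_a decisions_b k))
  -- the dict comprehension's keys are distinct and in order, so its items are the kept pairs
  let agreed := pairs.filterMap (fun p => p.2.map (fun v => (p.1, v)))
  let disagreed := PySem.Set.ofList ((pairs.filter (fun p => p.2.isNone)).map (·.1))
  (agreed, disagreed)

-- ===== PRECONDITION & SPEC =====
def Spec_find_disagreements_py (decisions_a : List (Int × String × Option String × String)) (decisions_b : List (Int × String × Option String × String)) (total : Int) (out : (List (Int × String × Option String × String)) × List Int) : Prop := out = find_disagreements_py_alt decisions_a decisions_b total
instance (decisions_a : List (Int × String × Option String × String)) (decisions_b : List (Int × String × Option String × String)) (total : Int) (out : (List (Int × String × Option String × String)) × List Int) : Decidable (Spec_find_disagreements_py decisions_a decisions_b total out) := by unfold Spec_find_disagreements_py; infer_instance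

-- ===== CLAIM (what is proved, stated in full; the proofs are below) =====
def Claim_equal_find_disagreements_py : Prop := ∀ (decisions_a : List (Int × String × Option String × String)) (decisions_b : List (Int × String × Option String × String)) (total : Int), Dom_find_disagreements_py decisions_a decisions_b total → Spec_find_disagreements_py decisions_a decisions_b total (find_disagreements_py decisions_a decisions_b total)

-- ===== LEMMAS AND PROOFS =====

-- the relevance test A's loop effectively performs at each index
def pvRel (da db : List (Int × String × Option String × String)) (idx : Int) : Bool :=
  ((PySem.Dict.mk da).get? idx).isSome || ((PySem.Dict.mk db).get? idx).isSome

-- A's loop body, characterised through B's merge function (at a relevant index)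
theorem pvStepA_eq_merge (da db : List (Int × String × Option String × String))
    (st) (idx : Int) (h : pvRel da db idx = true) :
    pvStepA da db st idx =
      match pvMerge da db idx with
      | some v => (st.1.insert idx v, st.2)
      | none => (st.1, PySem.Set.add st.2 idx) := by
  unfold pvStepA pvMerge pvRel at *
  cases ha : (PySem.Dict.mk da).get? idx <;> cases hb : (PySem.Dict.mk db).get? idx <;>
    simp [ha, hb] at h ⊢
  split <;> rfl

-- an index at which both lookups miss leaves A's state unchanged
theorem pvStepA_skip (da db : List (Int × String × Option String × String)) (st) (idx : Int)
    (h : pvRel da db idx = false) : pvStepA da db st idx = st := by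
  unfold pvRel at h
  rw [Bool.or_eq_false_iff] at h
  have ha : (PySem.Dict.mk da).get? idx = none :=
    Option.not_isSome_iff_eq_none.mp (by simp [h.1])
  have hb : (PySem.Dict.mk db).get? idx = none :=
    Option.not_isSome_iff_eq_none.mp (by simp [h.2])
  unfold pvStepA
  rw [ha, hb]

-- a fold whose body ignores elements failing p equals the fold over the filtered list
theorem pvFoldl_filter {α β : Type} (f : β → α → β) (p : α → Bool)
    (h : ∀ st x, p x = false → f st x = st) :
    ∀ (l : List α) (st : β), l.foldl f st = (l.filter p).foldl f st := by
  intro l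
  induction l with
  | nil => intro st; rfl
  | cons x t ih =>
    intro st
    by_cases hx : p x = true
    · simp [hx, ih]
    · simp only [Bool.not_eq_true] at hx
      simp [hx, h st x hx, ih]

-- get? on a literal dict hits iff the key occurs in the pair list
theorem pvGet?_mk_isSome {ν : Type} (l : List (Int × ν)) (x : Int) :
    ((PySem.Dict.mk l).get? x).isSome = true ↔ x ∈ l.map (·.1) := by
  induction l with
  | nil => simp [PySem.Dict.get?]
  | cons p t ih =>
    rw [PySem.Dict.get?_mk_cons]
    by_cases h : p.1 = x
    · simp [h]
    · have hbeq : (p.1 == x) = false := by simpa using h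
      simp [hbeq, ih, Ne.symm h]

-- B's relevant key list is exactly the relevant part of range(total), in order
theorem pvKeys_eq (da db : List (Int × String × Option String × String)) (total : Int) :
    (PySem.List.sorted
      (PySem.Set.union (PySem.Set.ofList (da.map (·.1)))
                       (PySem.Set.ofList (db.map (·.1)))) (fun x => x) false).filter
      (fun k => decide (0 ≤ k ∧ k < total))
    = (PySem.List.pyRange 0 total 1).filter (pvRel da db) := by
  have hsortedL : (PySem.List.sorted
      (PySem.Set.union (PySem.Set.ofList (da.map (·.1)))
                       (PySem.Set.ofList (db.map (·.1)))) (fun x => x) false).Pairwise (· < ·) := by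
    have : PySem.Set.union (PySem.Set.ofList (da.map (·.1))) (PySem.Set.ofList (db.map (·.1)))
        = PySem.Set.ofList (da.map (·.1) ++ db.map (·.1)) := by
      simp only [PySem.Set.union, PySem.Set.ofList_append]
      rw [PySem.Set.update_eq_append_filter, PySem.Set.update_eq_append_filter,
          PySem.Set.ofList_ofList]
    rw [this]
    exact PySem.List.sorted_ofList_pairwise_lt _
  have h1 : ((PySem.List.sorted
      (PySem.Set.union (PySem.Set.ofList (da.map (·.1)))
                       (PySem.Set.ofList (db.map (·.1)))) (fun x => x) false).filter
      (fun k => decide (0 ≤ k ∧ k < total))).Pairwise (· < ·) :=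
    hsortedL.sublist List.filter_sublist
  have h2 : ((PySem.List.pyRange 0 total 1).filter (pvRel da db)).Pairwise (· < ·) :=
    (PySem.List.pairwise_lt_pyRange_one 0 total).sublist List.filter_sublist
  have hperm : ((PySem.List.sorted
      (PySem.Set.union (PySem.Set.ofList (da.map (·.1)))
                       (PySem.Set.ofList (db.map (·.1)))) (fun x => x) false).filter
      (fun k => decide (0 ≤ k ∧ k < total))).Perm
      ((PySem.List.pyRange 0 total 1).filter (pvRel da db)) := by
    rw [List.perm_ext_iff_of_nodup h1.nodup h2.nodup]
    intro k
    simp only [List.mem_filter, PySem.List.mem_sorted, PySem.Set.mem_union,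
      PySem.Set.mem_ofList, PySem.List.mem_pyRange_one, pvRel, Bool.or_eq_true,
      pvGet?_mk_isSome, decide_eq_true_eq]
    tauto
  exact List.Perm.eq_of_pairwise
    (fun a b _ _ hab hba => absurd hba (lt_asymm hab)) h1 h2 hperm

-- A's fold over any duplicate-free relevant key list, fresh for the current state,
-- appends exactly B's comprehension results
theorem pvFold_spec (da db : List (Int × String × Option String × String)) :
    ∀ (L : List Int) (d : PySem.Dict Int (String × Option String × String)) (s : PySem.Set Int),
    L.Nodup → (∀ k ∈ L, pvRel da db k = true) →
    (∀ k ∈ L, d.contains k = false) → (∀ k ∈ L, k ∉ s) →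
    L.foldl (pvStepA da db) (d, s) =
      (PySem.Dict.mk (d.items ++
        (L.map (fun k => (k, pvMerge da db k))).filterMap (fun p => p.2.map (fun v => (p.1, v)))),
       s ++ ((L.map (fun k => (k, pvMerge da db k))).filter (fun p => p.2.isNone)).map (·.1)) := by
  intro L
  induction L with
  | nil =>
    intro d s _ _ _ _
    cases d
    simp
  | cons k t ih =>
    intro d s hnd hrel hd hs
    have hk : pvRel da db k = true := hrel k (List.mem_cons_self ..)
    rw [List.foldl_cons, pvStepA_eq_merge da db _ k hk]
    cases hm : pvMerge da db k with
    | some v =>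
      have hstep := ih (d.insert k v) s (List.nodup_cons.mp hnd).2
        (fun x hx => hrel x (List.mem_cons_of_mem _ hx))
        (fun x hx => by
          rw [PySem.Dict.contains_insert]
          have hne : x ≠ k := fun he => (List.nodup_cons.mp hnd).1 (he ▸ hx)
          simp [hne, hd x (List.mem_cons_of_mem _ hx)])
        (fun x hx => hs x (List.mem_cons_of_mem _ hx))
      simp only [hstep]
      rw [PySem.Dict.items_insert_of_not_contains _ v (hd k (List.mem_cons_self ..))]
      simp [hm]
    | none =>
      have hstep := ih d (PySem.Set.add s k) (List.nodup_cons.mp hnd).2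
        (fun x hx => hrel x (List.mem_cons_of_mem _ hx))
        (fun x hx => hd x (List.mem_cons_of_mem _ hx))
        (fun x hx => by
          rw [PySem.Set.mem_add]
          rintro (h | h)
          · exact hs x (List.mem_cons_of_mem _ hx) h
          · exact (List.nodup_cons.mp hnd).1 (h ▸ hx))
      simp only [hstep]
      rw [PySem.Set.add_of_not_mem (hs k (List.mem_cons_self ..))]
      simp [hm]

-- ===== VERDICT (by name: the statement is the Claim_ definition above) =====
theorem find_disagreements_py_spec : Claim_equal_find_disagreements_py := by
  intro da db total _
  unfold Spec_find_disagreements_py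
  simp only [find_disagreements_py, find_disagreements_py_alt]
  rw [pvFoldl_filter (pvStepA da db) (pvRel da db)
      (fun st x hx => pvStepA_skip da db st x hx)]
  have hnd : ((PySem.List.pyRange 0 total 1).filter (pvRel da db)).Nodup :=
    ((PySem.List.pairwise_lt_pyRange_one 0 total).sublist List.filter_sublist).nodup
  rw [pvFold_spec da db _ PySem.Dict.empty PySem.Set.empty hnd
      (fun k hk => (List.mem_filter.mp hk).2)
      (fun k _ => PySem.Dict.contains_empty k)
      (fun k _ h => absurd h (List.not_mem_nil))]
  rw [pvKeys_eq]
  have hnodup : (((PySem.List.pyRange 0 total 1).filter (pvRel da db)).map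
      (fun k => (k, pvMerge da db k))).Nodup :=
    hnd.map_on (fun x _ y _ he => congrArg Prod.fst he)
  refine Prod.ext ?_ ?_
  · simp [PySem.Dict.empty]
  · have hmapnodup : ((((((PySem.List.pyRange 0 total 1).filter (pvRel da db)).map
        (fun k => (k, pvMerge da db k))).filter (fun p => p.2.isNone)).map (·.1))).Nodup := by
      refine (hnodup.filter (fun p => p.2.isNone)).map_on (fun x hx y hy he => ?_)
      rcases List.mem_map.mp (List.mem_filter.mp hx).1 with ⟨a, _, rfl⟩
      rcases List.mem_map.mp (List.mem_filter.mp hy).1 with ⟨b, _, rfl⟩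
      exact congrArg (fun k => (k, pvMerge da db k)) he
    simp only
    rw [PySem.Set.ofList_eq_self_of_nodup _ hmapnodup]
    simp [PySem.Set.empty]
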